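-- pv_equiv track=rewrite | github.com/Sno0pCat/SmartPlate | app.py | split_meals_by_type
-- ===== SOURCE A (Python) =====
-- def split_meals_by_type(meals):
--     breakfast_meals = []
--     lunch_meals = []
--     dinner_meals = []
--
--     for meal in meals:
--         meal_type = meal.get("meal_type", "").strip().title()
--
--         if meal_type == "Breakfast":
--             breakfast_meals.append(meal)
--         elif meal_type == "Lunch":
--             lunch_meals.append(meal)
--         elif meal_type == "Dinner":
--             dinner_meals.append(meal)
--
--     return breakfast_meals, lunch_meals, dinner_meals
-- ===== SOURCE B (Python) =====
-- def split_meals_by_type(meals):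
--     def pick(t):
--         return [m for m in meals if m.get("meal_type", "").strip().title() == t]
--     return pick("Breakfast"), pick("Lunch"), pick("Dinner")
-- ===== Notes on version B (the rewrite author's own statement) =====
-- stated objective: idiomatic
-- what changed: Replaces the single accumulating loop with an if/elif dispatch by three independent comprehension passes, one per meal type.
import Mathlib
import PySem

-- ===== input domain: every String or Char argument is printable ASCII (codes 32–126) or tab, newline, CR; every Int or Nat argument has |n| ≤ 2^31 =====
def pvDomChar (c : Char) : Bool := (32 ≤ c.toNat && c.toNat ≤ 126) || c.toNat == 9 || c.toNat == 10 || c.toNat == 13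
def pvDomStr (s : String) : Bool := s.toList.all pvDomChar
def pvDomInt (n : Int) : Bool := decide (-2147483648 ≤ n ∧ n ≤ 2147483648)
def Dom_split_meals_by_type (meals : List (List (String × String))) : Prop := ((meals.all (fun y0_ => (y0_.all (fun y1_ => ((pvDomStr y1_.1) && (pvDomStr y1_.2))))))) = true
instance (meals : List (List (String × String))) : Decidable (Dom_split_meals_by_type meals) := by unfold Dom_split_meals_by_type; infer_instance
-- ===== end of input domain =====

-- B replaces A's single loop with if/elif dispatch by three independent filtering
-- passes (one per meal type); same cost, more idiomatic. Return value proved equal.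


-- ===== PORT A =====
-- shared helpers for Python constructs both sources use:
-- meal.get("meal_type", "") on an association-list dict = first match, else default
def pvDictGet (meal : List (String × String)) : String :=
  match meal.find? (fun p => p.1 == "meal_type") with
  | some p => p.2
  | none => ""

-- str.title(), ported by hand character by character (exact on ASCII: a character
-- is cased iff it is a Latin letter; Char.toUpper/toLower are exact there)
def pvTitleGo (prevCased : Bool) : List Char → List Char
  | [] => []
  | c :: cs =>
    let isA := c.isAlpha
    let c' := if isA then (if prevCased then c.toLower else c.toUpper) else c
    c' :: pvTitleGo isA cs

def pvTitle (s : String) : String := String.ofList (pvTitleGo false s.toList)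

-- meal.get("meal_type", "").strip().title()
def pvMealType (meal : List (String × String)) : String :=
  pvTitle (PySem.Str.strip (pvDictGet meal))

-- the body of A's for-loop, one step (named so the invariant lemma can cite it)
def pvStepA (acc : List (List (String × String)) × List (List (String × String)) × List (List (String × String))) (meal : List (String × String)) : List (List (String × String)) × List (List (String × String)) × List (List (String × String)) :=
  let meal_type := pvMealType meal
  if meal_type == "Breakfast" then (acc.1 ++ [meal], acc.2.1, acc.2.2)
  else if meal_type == "Lunch" then (acc.1, acc.2.1 ++ [meal], acc.2.2)
  else if meal_type == "Dinner" then (acc.1, acc.2.1, acc.2.2 ++ [meal])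
  else acc

def split_meals_by_type (meals : List (List (String × String))) : (List (List (String × String))) × (List (List (String × String))) × (List (List (String × String))) :=
  meals.foldl pvStepA ([], [], [])

-- ===== PORT B =====
def pvPick (meals : List (List (String × String))) (t : String) : List (List (String × String)) :=
  meals.filter (fun m => pvMealType m == t)

def split_meals_by_type_alt (meals : List (List (String × String))) : (List (List (String × String))) × (List (List (String × String))) × (List (List (String × String))) :=
  (pvPick meals "Breakfast", pvPick meals "Lunch", pvPick meals "Dinner")

-- ===== PRECONDITION & SPEC =====
def Spec_split_meals_by_type (meals : List (List (String × String))) (out : (List (List (String × String))) × (List (List (String × String))) × (List (List (String × String)))) : Prop := out = split_meals_by_type_alt meals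
instance (meals : List (List (String × String))) (out : (List (List (String × String))) × (List (List (String × String))) × (List (List (String × String)))) : Decidable (Spec_split_meals_by_type meals out) := by unfold Spec_split_meals_by_type; infer_instance

-- ===== CLAIM (what is proved, stated in full; the proofs are below) =====
def Claim_equal_split_meals_by_type : Prop := ∀ (meals : List (List (String × String))), Dom_split_meals_by_type meals → Spec_split_meals_by_type meals (split_meals_by_type meals)

-- ===== LEMMAS AND PROOFS =====
theorem pv_loop_eq (meals b l d : List (List (String × String))) :
    meals.foldl pvStepA (b, l, d)
    = (b ++ pvPick meals "Breakfast", l ++ pvPick meals "Lunch", d ++ pvPick meals "Dinner") := by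
  induction meals generalizing b l d with
  | nil => simp [pvPick]
  | cons m ms ih =>
    rw [List.foldl_cons]
    by_cases hb : pvMealType m == "Breakfast"
    · have hm : pvMealType m = "Breakfast" := by simpa using hb
      rw [show pvStepA (b, l, d) m = (b ++ [m], l, d) from by simp [pvStepA, hb], ih]
      simp [pvPick, hm]
    · by_cases hl : pvMealType m == "Lunch"
      · have hm : pvMealType m = "Lunch" := by simpa using hl
        rw [show pvStepA (b, l, d) m = (b, l ++ [m], d) from by simp [pvStepA, hb, hl], ih]
        simp [pvPick, hm]
      · by_cases hd : pvMealType m == "Dinner"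
        · have hm : pvMealType m = "Dinner" := by simpa using hd
          rw [show pvStepA (b, l, d) m = (b, l, d ++ [m]) from by simp [pvStepA, hb, hl, hd], ih]
          simp [pvPick, hm]
        · rw [show pvStepA (b, l, d) m = (b, l, d) from by simp [pvStepA, hb, hl, hd], ih]
          simp [pvPick, hb, hl, hd]

-- ===== VERDICT (by name: the statement is the Claim_ definition above) =====
theorem split_meals_by_type_spec : Claim_equal_split_meals_by_type := by
  intro meals _
  unfold Spec_split_meals_by_type split_meals_by_type split_meals_by_type_alt
  simpa using pv_loop_eq meals [] [] []
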